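-- pv_equiv track=rewrite | github.com/Leehyeonju0219/Baekjoon-Solution | 프로그래머스/0/120896. 한 번만 등장한 문자/한 번만 등장한 문자.py | solution
-- ===== SOURCE A (Python) =====
-- from collections import Counter
--
-- def solution(s):
--     answer = ''
--     s = ''.join(sorted(s))
--     sH = Counter(s)
--     for k,v in sH.items():
--         if v == 1:
--             answer += k
--     return answer
-- ===== SOURCE B (Python) =====
-- def solution(s):
--     # run-based scan over the sorted characters: a character appears exactly once
--     # iff its run in the sorted order has length 1 (no frequency table maintained)
--     t = sorted(s)
--     out = []
--     i, n = 0, len(t)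
--     while i < n:
--         j = i + 1
--         while j < n and t[j] == t[i]:
--             j += 1
--         if j - i == 1:
--             out.append(t[i])
--         i = j
--     return ''.join(out)
-- ===== Notes on version B (the rewrite author's own statement) =====
-- stated objective: idiomatic
-- what changed: B replaces the Counter frequency dictionary by a single run-based scan of the sorted characters, emitting each run key whose run length is exactly 1.
import Mathlib
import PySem

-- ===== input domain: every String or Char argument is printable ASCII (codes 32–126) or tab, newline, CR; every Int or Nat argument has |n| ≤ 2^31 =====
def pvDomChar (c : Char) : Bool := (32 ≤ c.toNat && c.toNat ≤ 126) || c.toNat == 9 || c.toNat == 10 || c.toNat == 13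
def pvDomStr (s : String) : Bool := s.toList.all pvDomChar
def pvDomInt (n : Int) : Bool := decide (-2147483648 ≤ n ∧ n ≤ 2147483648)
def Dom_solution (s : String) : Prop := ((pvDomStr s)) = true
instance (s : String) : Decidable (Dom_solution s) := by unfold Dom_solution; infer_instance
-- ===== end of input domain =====

-- B replaces A's Counter frequency dictionary by a run-based scan of the sorted
-- characters (a singleton character is a run of length 1); objective: idiomatic.

-- ===== PORT A =====
def solution (s : String) : String :=
  let t := PySem.List.sorted s.toList (fun c => c)          -- s = ''.join(sorted(s))
  let sH := PySem.Dict.counter t                            -- sH = Counter(s)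
  let answer := sH.items.foldl                               -- for k,v in sH.items(): if v == 1: answer += k
    (fun acc kv => if kv.2 == 1 then acc ++ [kv.1] else acc) ([] : List Char)
  String.ofList answer

-- ===== PORT B =====
-- run scan: j advances to the end of the run of t[i]; emit t[i] iff the run has length 1
def altRuns : List Char → List Char
  | [] => []
  | c :: rest =>
    let j := (rest.takeWhile (fun x => x == c)).length + 1
    (if j == 1 then [c] else []) ++ altRuns (rest.dropWhile (fun x => x == c))
  termination_by l => l.length
  decreasing_by
    simp only [List.length_cons]
    exact Nat.lt_succ_of_le (List.length_dropWhile_le _ _)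

def solution_alt (s : String) : String :=
  String.ofList (altRuns (PySem.List.sorted s.toList (fun c => c)))

-- ===== PRECONDITION & SPEC =====
def Spec_solution (s : String) (out : String) : Prop := out = solution_alt s
instance (s : String) (out : String) : Decidable (Spec_solution s out) := by unfold Spec_solution; infer_instance

-- ===== CLAIM (what is proved, stated in full; the proofs are below) =====
def Claim_equal_solution : Prop := ∀ (s : String), Dom_solution s → Spec_solution s (solution s)

-- ===== LEMMAS AND PROOFS =====

-- head of a run: all of takeWhile (== c) is c
lemma all_takeWhile_beq (c : Char) (l : List Char) :
    ∀ x ∈ l.takeWhile (fun x => x == c), x = c := by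
  intro x hx
  have := List.mem_takeWhile_imp hx
  exact eq_of_beq this

-- in a sorted list whose elements dominate c, c does not survive dropWhile (== c)
lemma not_mem_dropWhile_beq (c : Char) :
    ∀ l : List Char, l.Pairwise (· ≤ ·) → (∀ x ∈ l, c ≤ x) →
      c ∉ l.dropWhile (fun x => x == c) := by
  intro l
  induction l with
  | nil => intro _ _ h; simp at h
  | cons a l ih =>
    intro hp hle
    by_cases ha : a = c
    · subst ha
      rw [List.dropWhile_cons_of_pos (by simp)]
      exact ih (List.pairwise_cons.1 hp).2 (List.pairwise_cons.1 hp).1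
    · rw [List.dropWhile_cons_of_neg (by simp [ha])]
      intro hc
      rcases List.mem_cons.1 hc with h | h
      · exact ha h.symm
      · have h1 : c ≤ a := hle a (List.mem_cons_self)
        have h2 : a ≤ c := (List.pairwise_cons.1 hp).1 c h
        exact ha (le_antisymm h2 h1)

-- a cons whose tail-prefix repeats the head dedups to the head alone
lemma ofList_head_run (c : Char) (r1 : List Char) (h : ∀ x ∈ r1, x = c) :
    PySem.Set.ofList (c :: r1) = [c] := by
  rw [PySem.Set.ofList_cons]
  have hd : PySem.Set.discard (PySem.Set.ofList r1) c = [] := by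
    rw [List.eq_nil_iff_forall_not_mem]
    intro y hy
    have := (PySem.Set.mem_discard _ _ _).1 hy
    exact this.2 (h y ((PySem.Set.mem_ofList _ _).1 this.1))
  rw [hd]

-- core: on a sorted list, A's "dedup filtered by count == 1" IS B's run scan
lemma filter_count_eq_altRuns (n : Nat) :
    ∀ t : List Char, t.length ≤ n → t.Pairwise (· ≤ ·) →
      (PySem.Set.ofList t).filter (fun k => t.count k == 1) = altRuns t := by
  induction n with
  | zero =>
    intro t ht _
    have : t = [] := List.eq_nil_of_length_eq_zero (Nat.le_zero.1 ht)
    subst this; simp [altRuns, PySem.Set.ofList_nil]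
  | succ n ih =>
    intro t ht hp
    cases t with
    | nil => simp [altRuns, PySem.Set.ofList_nil]
    | cons c rest =>
      set r1 := rest.takeWhile (fun x => x == c) with hr1
      set r2 := rest.dropWhile (fun x => x == c) with hr2
      have hsplit : r1 ++ r2 = rest := List.takeWhile_append_dropWhile
      have h1 : ∀ x ∈ r1, x = c := all_takeWhile_beq c rest
      obtain ⟨hle, hprest⟩ := List.pairwise_cons.1 hp
      have hc2 : c ∉ r2 := not_mem_dropWhile_beq c rest hprest hle
      -- counts
      have hcntc : (c :: rest).count c = r1.length + 1 := by
        rw [List.count_cons_self, ← hsplit, List.count_append]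
        rw [List.count_eq_length.2 (fun b hb => (h1 b hb).symm),
            List.count_eq_zero.2 hc2]
      have hcntk : ∀ k ∈ r2, (c :: rest).count k = r2.count k := by
        intro k hk
        have hkc : k ≠ c := fun h => hc2 (h ▸ hk)
        have hz : r1.count k = 0 := List.count_eq_zero.2 (fun hmem => hkc (h1 k hmem))
        rw [← hsplit]
        simp [List.count_append, hz, Ne.symm hkc]
      -- dedup structure
      have hofList : PySem.Set.ofList (c :: rest) = c :: PySem.Set.ofList r2 := by
        have : c :: rest = (c :: r1) ++ r2 := by simp [hsplit]
        rw [this, PySem.Set.ofList_append, ofList_head_run c r1 h1,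
            PySem.Set.update_eq_append_filter]
        have : (PySem.Set.ofList r2).filter (fun y => !PySem.Set.contains [c] y)
            = PySem.Set.ofList r2 := by
          apply List.filter_eq_self.2
          intro y hy
          have hyr2 : y ∈ r2 := (PySem.Set.mem_ofList _ _).1 hy
          have : y ≠ c := fun h => hc2 (h ▸ hyr2)
          simp [PySem.Set.contains, this]
        rw [this]; rfl
      -- sortedness and size of r2 for the IH
      have hp2 : r2.Pairwise (· ≤ ·) := hprest.sublist (List.dropWhile_sublist _)
      have hlen2 : r2.length ≤ n := by
        have hd := List.length_dropWhile_le (fun x => x == c) rest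
        rw [← hr2] at hd
        have hrest : rest.length ≤ n := by
          simpa [Nat.succ_le_succ_iff] using ht
        omega
      have hIH := ih r2 hlen2 hp2
      -- assemble
      rw [hofList, List.filter_cons]
      have hfc : ((c :: rest).count c == 1) = (r1.length + 1 == 1) := by
        rw [hcntc]
      have hcong : (PySem.Set.ofList r2).filter (fun k => (c :: rest).count k == 1)
          = (PySem.Set.ofList r2).filter (fun k => r2.count k == 1) := by
        apply List.filter_congr
        intro k hk
        rw [hcntk k ((PySem.Set.mem_ofList _ _).1 hk)]
      rw [hfc, hcong, hIH]
      show (if (r1.length + 1 == 1) = true then c :: altRuns r2 else altRuns r2)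
          = altRuns (c :: rest)
      rw [altRuns]
      by_cases hr : r1.length = 0 <;> simp [hr, ← hr1, ← hr2]

-- the Int count in Counter's items compares to 1 exactly as the Nat count does
lemma intBeq_one (m : Nat) : (((m : Nat) : Int) == (1 : Int)) = (m == 1) := by
  by_cases h : m = 1 <;> simp [h]

-- ===== VERDICT (by name: the statement is the Claim_ definition above) =====
theorem solution_spec : Claim_equal_solution := by
  intro s _
  show solution s = solution_alt s
  set t := PySem.List.sorted s.toList (fun c => c) with hts
  have hsort : t.Pairwise (· ≤ ·) := by
    simpa using PySem.List.sorted_pairwise s.toList (fun c => c)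
  show String.ofList ((PySem.Dict.counter t).items.foldl
      (fun acc kv => if kv.2 == 1 then acc ++ [kv.1] else acc) ([] : List Char))
    = String.ofList (altRuns t)
  congr 1
  simp only [PySem.Dict.items_counter, List.foldl_map]
  rw [PySem.List.foldl_append_if (p := fun k => ((t.count k : Int) == 1)) (f := fun k => k)]
  simp only [List.nil_append, List.map_id']
  rw [show (fun k => ((t.count k : Int) == (1 : Int))) = (fun k => (t.count k == 1)) from
        funext (fun k => intBeq_one (t.count k))]
  exact filter_count_eq_altRuns t.length t (le_refl _) hsort
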